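-- pv_equiv track=rewrite | github.com/Iamhspet/crispy-octo-journey | statistics_chisquare.py | norm_str
-- ===== SOURCE A (Python) =====
-- def norm_str(string):
--     temp = ""
--     string = string.lower()
--     letter = " abcdefghijklmnopqrstuvwxyz01234567890"
--     for c in string:
--         if c in letter:
--             temp = temp + c
--     return(temp)
-- ===== SOURCE B (Python) =====
-- import re
--
-- def norm_str(string):
--     return re.sub(r'[^a-z0-9 ]', '', string.lower())
-- ===== Notes on version B (the rewrite author's own statement) =====
-- stated objective: idiomatic
-- what changed: Replaces the per-character membership loop with quadratic string concatenation by a single regex substitution that deletes every character outside the class [a-z0-9 ] after lowercasing.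
import Mathlib
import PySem

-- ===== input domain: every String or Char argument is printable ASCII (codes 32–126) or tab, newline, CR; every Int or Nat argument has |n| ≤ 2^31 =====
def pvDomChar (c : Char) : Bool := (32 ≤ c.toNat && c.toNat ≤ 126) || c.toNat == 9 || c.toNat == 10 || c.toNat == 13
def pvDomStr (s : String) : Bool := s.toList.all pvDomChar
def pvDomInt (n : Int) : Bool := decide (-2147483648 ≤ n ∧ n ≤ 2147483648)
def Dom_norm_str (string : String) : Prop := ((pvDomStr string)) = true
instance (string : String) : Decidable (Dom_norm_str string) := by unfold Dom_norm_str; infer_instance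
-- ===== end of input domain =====

-- B replaces A's per-character membership loop with a single regex substitution deleting
-- everything outside the class [a-z0-9 ] after lowercasing (idiomatic rewrite, same cost class).


-- ===== PORT A =====
-- the literal `letter` string from A (note the duplicated '0' at the end)
def pvLetterA : List Char := [' ', 'a', 'b', 'c', 'd', 'e', 'f', 'g', 'h', 'i', 'j', 'k', 'l', 'm', 'n', 'o', 'p', 'q', 'r', 's', 't', 'u', 'v', 'w', 'x', 'y', 'z', '0', '1', '2', '3', '4', '5', '6', '7', '8', '9', '0']

-- A: lowercase, then loop over the characters appending each `c` with `c in letter` to `temp`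
def norm_str (string : String) : String :=
  String.ofList
    ((PySem.Str.lower string).toList.foldl
      (fun temp c => if c ∈ pvLetterA then temp ++ [c] else temp) [])

-- ===== PORT B =====
-- the regex character class [^a-z0-9 ]: a char is DELETED iff it is not a-z, not 0-9, not ' '
def pvKeepB (c : Char) : Bool := ('a' ≤ c && c ≤ 'z') || ('0' ≤ c && c ≤ '9') || c == ' '

-- B: re.sub(r'[^a-z0-9 ]', '', string.lower()) — one pass deleting every char matching the class
def norm_str_alt (string : String) : String :=
  String.ofList ((PySem.Str.lower string).toList.filter pvKeepB)

-- ===== PRECONDITION & SPEC =====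
def Spec_norm_str (string : String) (out : String) : Prop := out = norm_str_alt string
instance (string : String) (out : String) : Decidable (Spec_norm_str string out) := by unfold Spec_norm_str; infer_instance

-- ===== CLAIM (what is proved, stated in full; the proofs are below) =====
def Claim_equal_norm_str : Prop := ∀ (string : String), Dom_norm_str string → Spec_norm_str string (norm_str string)

-- ===== LEMMAS AND PROOFS =====

-- A's keep-set (membership in the literal letter string) is exactly B's character class
lemma mem_letterA_iff_keepB (c : Char) : (c ∈ pvLetterA) ↔ pvKeepB c = true := by
  have hval : ∀ d : Char, (c = d) ↔ c.toNat = d.toNat := by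
    intro d
    constructor
    · intro h; rw [h]
    · intro h
      exact Char.ext (by
        have : c.val.toNat = d.val.toNat := h
        exact UInt32.toNat_inj.mp this)
  simp only [pvLetterA, pvKeepB, List.mem_cons, List.not_mem_nil, or_false,
    Bool.or_eq_true, Bool.and_eq_true, decide_eq_true_eq, beq_iff_eq, Char.le_def,
    UInt32.le_iff_toNat_le]
  simp only [hval]
  simp only [Char.toNat, show (' ').val.toNat = 32 from rfl, show ('a').val.toNat = 97 from rfl, show ('b').val.toNat = 98 from rfl, show ('c').val.toNat = 99 from rfl, show ('d').val.toNat = 100 from rfl, show ('e').val.toNat = 101 from rfl, show ('f').val.toNat = 102 from rfl, show ('g').val.toNat = 103 from rfl, show ('h').val.toNat = 104 from rfl, show ('i').val.toNat = 105 from rfl, show ('j').val.toNat = 106 from rfl, show ('k').val.toNat = 107 from rfl, show ('l').val.toNat = 108 from rfl, show ('m').val.toNat = 109 from rfl, show ('n').val.toNat = 110 from rfl, show ('o').val.toNat = 111 from rfl, show ('p').val.toNat = 112 from rfl, show ('q').val.toNat = 113 from rfl, show ('r').val.toNat = 114 from rfl, show ('s').val.toNat = 115 from rfl, show ('t').val.toNat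 = 116 from rfl, show ('u').val.toNat = 117 from rfl, show ('v').val.toNat = 118 from rfl, show ('w').val.toNat = 119 from rfl, show ('x').val.toNat = 120 from rfl, show ('y').val.toNat = 121 from rfl, show ('z').val.toNat = 122 from rfl, show ('0').val.toNat = 48 from rfl, show ('1').val.toNat = 49 from rfl, show ('2').val.toNat = 50 from rfl, show ('3').val.toNat = 51 from rfl, show ('4').val.toNat = 52 from rfl, show ('5').val.toNat = 53 from rfl, show ('6').val.toNat = 54 from rfl, show ('7').val.toNat = 55 from rfl, show ('8').val.toNat = 56 from rfl, show ('9').val.toNat = 57 from rfl]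
  omega

-- ===== VERDICT (by name: the statement is the Claim_ definition above) =====
theorem norm_str_spec : Claim_equal_norm_str := by
  intro s _
  show norm_str s = norm_str_alt s
  unfold norm_str norm_str_alt
  rw [PySem.List.foldl_append_ite_eq_filter]
  congr 1
  apply List.filter_congr
  intro c _
  simp [mem_letterA_iff_keepB c]
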